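-- pv_equiv track=rewrite | github.com/leelovejava/Python-Learning | pv&uv/pvuvdata.py | getUserCount
-- ===== SOURCE A (Python) =====
-- def getUserCount(one):
--     uid = one[0]
--     siteIterable = one[1]
--     siteDic = {}
--     for site in siteIterable:
--         if site in siteDic:
--             siteDic[site] += 1
--         else:
--             siteDic[site] = 1
--     returnList = []
--     for site, count in siteDic.items():
--         returnList.append((site, (uid, count)))
--
--     return returnList
-- ===== SOURCE B (Python) =====
-- def getUserCount(one):
--     uid = one[0]
--     result = []
--     rest = one[1]
--     while rest:
--         site = rest[0]
--         count = 0
--         remaining = []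
--         for s in rest:
--             if s == site:
--                 count += 1
--             else:
--                 remaining.append(s)
--         result.append((site, (uid, count)))
--         rest = remaining
--     return result
-- ===== Notes on version B (the rewrite author's own statement) =====
-- stated objective: alternative
-- what changed: Replaces the single-pass dict counting with an extract-and-remove worklist: repeatedly take the first remaining site, count and delete all its occurrences in one combined pass, emit its tuple, and continue on the shrunken list; no dict or seen-list is maintained.
import Mathlib
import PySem

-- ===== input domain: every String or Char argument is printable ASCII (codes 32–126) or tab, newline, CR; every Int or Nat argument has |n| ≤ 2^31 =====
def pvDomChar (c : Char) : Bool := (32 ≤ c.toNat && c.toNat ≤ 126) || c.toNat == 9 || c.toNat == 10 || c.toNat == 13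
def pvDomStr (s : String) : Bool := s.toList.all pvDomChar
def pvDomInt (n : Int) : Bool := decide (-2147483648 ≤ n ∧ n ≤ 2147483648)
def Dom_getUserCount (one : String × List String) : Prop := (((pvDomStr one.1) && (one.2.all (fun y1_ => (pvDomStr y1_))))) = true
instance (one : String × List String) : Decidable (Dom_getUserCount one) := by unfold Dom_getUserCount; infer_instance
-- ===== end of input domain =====

-- B replaces A's dict-based counting with an extract-and-remove worklist (alternative decomposition, same output; no speed claim).


-- ===== PORT A =====
def getUserCount (one : String × List String) : List (String × (String × Int)) :=
  let uid := one.1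
  let siteIterable := one.2
  let siteDic := siteIterable.foldl
    (fun d site => if d.contains site then d.modify site 0 (· + 1) else d.insert site 1)
    PySem.Dict.empty
  siteDic.items.foldl (fun rl p => rl ++ [(p.1, (uid, p.2))]) []

-- ===== PORT B =====
-- the inner 'for s in rest' pass of Source B: counts the head site and collects the others
def pvInner (site : String) (rest : List String) : Int × List String :=
  rest.foldl (fun acc s => if s == site then (acc.1 + 1, acc.2) else (acc.1, acc.2 ++ [s])) (0, [])

-- characterisation of pvInner, cited by pvGo's decreasing_by
theorem pvInner_eq (site : String) (l : List String) :
    ∀ (c : Int) (acc : List String),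
      l.foldl (fun acc s => if s == site then (acc.1 + 1, acc.2) else (acc.1, acc.2 ++ [s])) (c, acc)
        = (c + (l.count site : Int), acc ++ l.filter (fun s => !(s == site))) := by
  induction l with
  | nil => intro c acc; simp
  | cons a l ih =>
    intro c acc
    cases h : (a == site) with
    | true =>
      have ha : a = site := by simpa using h
      subst ha
      simp only [List.foldl_cons, h, if_true, ih, List.count_cons, List.filter_cons,
        Bool.not_true, Prod.mk.injEq]
      constructor
      · push_cast; ring
      · simp
    | false =>
      simp only [List.foldl_cons, h, ih, List.count_cons, List.filter_cons,
        Bool.not_false, if_true, Prod.mk.injEq]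
      constructor
      · simp
      · simp

-- the while loop of Source B as structural recursion on the shrinking worklist
def pvGo (uid : String) (result : List (String × (String × Int))) :
    List String → List (String × (String × Int))
  | [] => result
  | site :: tl =>
    let p := pvInner site (site :: tl)
    pvGo uid (result ++ [(site, (uid, p.1))]) p.2
termination_by rest => rest.length
decreasing_by
  simp only [pvInner, pvInner_eq]
  have := List.length_filter_le (fun s => !(s == site)) tl
  simp
  omega

def getUserCount_alt (one : String × List String) : List (String × (String × Int)) :=
  pvGo one.1 [] one.2

-- ===== PRECONDITION & SPEC =====
def Spec_getUserCount (one : String × List String) (out : List (String × (String × Int))) : Prop := out = getUserCount_alt one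
instance (one : String × List String) (out : List (String × (String × Int))) : Decidable (Spec_getUserCount one out) := by unfold Spec_getUserCount; infer_instance

-- ===== CLAIM (what is proved, stated in full; the proofs are below) =====
def Claim_equal_getUserCount : Prop := ∀ (one : String × List String), Dom_getUserCount one → Spec_getUserCount one (getUserCount one)

-- ===== LEMMAS AND PROOFS =====
-- A's loop body equals Counter's update step (absent key: insert 1 = modify with default 0 then +1)
theorem pv_step_eq (d : PySem.Dict String Int) (x : String) :
    (if d.contains x then d.modify x 0 (· + 1) else d.insert x 1) = d.modify x 0 (· + 1) := by
  by_cases h : d.contains x = true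
  · simp [h]
  · have hb : d.contains x = false := by simpa using h
    simp [h, PySem.Dict.insert, PySem.Dict.modify,
      PySem.Dict.getD_of_not_contains (h := hb)]

theorem pv_dict_eq_counter (xs : List String) :
    xs.foldl (fun d x => if d.contains x then d.modify x 0 (· + 1) else d.insert x 1)
      PySem.Dict.empty = PySem.Dict.counter xs := by
  rw [PySem.Dict.counter_eq_foldl]
  exact PySem.List.foldl_congr_mem _ _ _ _ (fun d x _ => pv_step_eq d x)

-- Set.discard is a filter (definitional)
theorem pv_discard_eq (s : PySem.Set String) (x : String) :
    PySem.Set.discard s x = s.filter (fun y => !(y == x)) := rfl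

-- dedup commutes with filter
theorem pv_ofList_filter (p : String → Bool) (l : List String) :
    PySem.Set.ofList (l.filter p) = (PySem.Set.ofList l).filter p := by
  induction l with
  | nil => rfl
  | cons a l ih =>
    cases h : p a with
    | true =>
      simp only [List.filter_cons, h, if_true, PySem.Set.ofList_cons, pv_discard_eq]
      rw [ih, List.filter_comm]
    | false =>
      simp only [List.filter_cons, h, Bool.false_eq_true, if_false, PySem.Set.ofList_cons,
        pv_discard_eq]
      rw [ih, List.filter_comm]
      symm
      apply List.filter_eq_self.mpr
      intro y hy
      have hpy : p y = true := (List.mem_filter.mp hy).2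
      have : ¬ y = a := fun hya => by rw [hya, h] at hpy; exact Bool.false_ne_true hpy
      simpa using this

-- the worklist loop computes the dedup-and-count map
theorem pvGo_spec (uid : String) :
    ∀ (n : Nat) (rest : List String), rest.length ≤ n → ∀ (result : List (String × (String × Int))),
      pvGo uid result rest
        = result ++ (PySem.Set.ofList rest).map (fun k => (k, (uid, (rest.count k : Int)))) := by
  intro n
  induction n with
  | zero =>
    intro rest h result
    have : rest = [] := List.eq_nil_of_length_eq_zero (Nat.le_zero.mp h)
    subst this; simp [pvGo]
  | succ n ih =>
    intro rest h result
    match rest with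
    | [] => simp [pvGo]
    | site :: tl =>
      have hsite : (site == site) = true := by simp
      rw [pvGo]
      simp only [pvInner, pvInner_eq, List.filter_cons, hsite, Bool.not_true,
        Bool.false_eq_true, if_false, List.nil_append]
      have hlen : (tl.filter (fun s => !(s == site))).length ≤ n := by
        have h1 := List.length_filter_le (fun s => !(s == site)) tl
        have h2 : tl.length ≤ n := by simpa using Nat.le_of_succ_le_succ h
        omega
      rw [ih _ hlen]
      rw [List.append_assoc]
      congr 1
      rw [PySem.Set.ofList_cons, pv_discard_eq, ← pv_ofList_filter]
      simp only [List.map_cons, List.singleton_append, List.cons.injEq]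
      constructor
      · simp
      · apply List.map_congr_left
        intro k hk
        have hkmem : k ∈ tl.filter (fun s => !(s == site)) :=
          (PySem.Set.mem_ofList _ k).mp hk
        have hkp : (!(k == site)) = true := (List.mem_filter.mp hkmem).2
        have hkne : (k == site) = false := by simpa using hkp
        rw [List.count_filter (p := fun s => !(s == site)) (a := k) hkp, List.count_cons]
        have hsk : (site == k) = false := by
          rw [beq_eq_false_iff_ne] at hkne ⊢
          exact fun e => hkne e.symm
        simp [hsk]

-- ===== VERDICT (by name: the statement is the Claim_ definition above) =====
theorem getUserCount_spec : Claim_equal_getUserCount := by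
  intro one _
  show getUserCount one = getUserCount_alt one
  simp only [getUserCount, getUserCount_alt, pv_dict_eq_counter,
    PySem.List.foldl_append_singleton_eq_map, PySem.Dict.items_counter, List.map_map]
  rw [pvGo_spec one.1 one.2.length one.2 (le_refl _) []]
  simp [Function.comp]
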